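-- pv_equiv track=rewrite | github.com/ChezRD/giga-experiments | ctc_longform_inference.py | process_transcriptions
-- ===== SOURCE A (Python) =====
-- def process_transcriptions(transcriptions):
--     result = []
--     current_group = []
--     for i, s in enumerate(transcriptions):
--         if s == "\n\n":
--             if current_group:
--                 result.append(" ".join(current_group).split("\n"))
--             current_group = []
--         else:
--             current_group.append(s)
--     if current_group:
--         result.append(" ".join(current_group).split("\n"))
--     return result
-- ===== SOURCE B (Python) =====
-- def process_transcriptions(transcriptions):
--     # Boundary-index algorithm: collect the positions of the "\n\n" markers,
--     # derive the (start, end) bounds of every segment between consecutive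
--     # markers arithmetically, and format each non-empty slice.
--     n = len(transcriptions)
--     marks = [i for i, s in enumerate(transcriptions) if s == "\n\n"]
--     starts = [0] + [m + 1 for m in marks]
--     ends = marks + [n]
--     return [" ".join(transcriptions[a:b]).split("\n")
--             for a, b in zip(starts, ends) if a < b]
-- ===== Notes on version B (the rewrite author's own statement) =====
-- stated objective: alternative
-- what changed: B replaces A's accumulate/conditionally-emit/reset loop by a boundary-index algorithm: it first collects the indices of the "\n\n" markers, derives every segment's (start, end) bounds arithmetically (zip of shifted marker positions), and formats each non-empty slice; no running group accumulator exists.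
import Mathlib
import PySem

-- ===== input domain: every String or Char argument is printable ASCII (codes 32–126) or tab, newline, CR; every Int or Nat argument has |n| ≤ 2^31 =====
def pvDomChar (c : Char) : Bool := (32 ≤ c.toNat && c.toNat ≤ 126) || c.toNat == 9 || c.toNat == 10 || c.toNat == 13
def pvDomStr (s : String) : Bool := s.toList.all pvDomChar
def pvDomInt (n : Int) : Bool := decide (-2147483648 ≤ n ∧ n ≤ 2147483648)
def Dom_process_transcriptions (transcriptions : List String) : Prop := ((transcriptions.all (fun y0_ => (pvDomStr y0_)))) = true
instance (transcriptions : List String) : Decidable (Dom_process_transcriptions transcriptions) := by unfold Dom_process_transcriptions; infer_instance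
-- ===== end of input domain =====

-- B replaces A's accumulate/emit/reset loop by a boundary-index algorithm: it collects the
-- positions of the "\n\n" markers, derives each segment's (start, end) bounds arithmetically
-- and formats every non-empty slice; return values are equal.

-- ===== PORT A =====
def process_transcriptions (transcriptions : List String) : List (List String) :=
  -- the enumerate index i is unused by A's body
  let st := (PySem.List.enumerate transcriptions).foldl
    (fun (st : List (List String) × List String) (p : Int × String) =>
      if p.2 == "\n\n" then
        (if st.2 ≠ [] then st.1 ++ [((PySem.Str.split? (PySem.Str.join " " st.2) "\n").getD [])] else st.1, [])
      else (st.1, st.2 ++ [p.2])) ([], [])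
  if st.2 ≠ [] then st.1 ++ [((PySem.Str.split? (PySem.Str.join " " st.2) "\n").getD [])] else st.1

-- ===== PORT B =====
def process_transcriptions_alt (transcriptions : List String) : List (List String) :=
  let n : Int := transcriptions.length
  let marks : List Int := ((PySem.List.enumerate transcriptions).filter (fun p => p.2 == "\n\n")).map (fun p => p.1)
  let starts : List Int := 0 :: marks.map (· + 1)
  let ends : List Int := marks ++ [n]
  ((starts.zip ends).filter (fun p => decide (p.1 < p.2))).map
    (fun p => (PySem.Str.split? (PySem.Str.join " " (PySem.List.slice transcriptions (some p.1) (some p.2))) "\n").getD [])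

-- ===== PRECONDITION & SPEC =====
def Spec_process_transcriptions (transcriptions : List String) (out : List (List String)) : Prop := out = process_transcriptions_alt transcriptions
instance (transcriptions : List String) (out : List (List String)) : Decidable (Spec_process_transcriptions transcriptions out) := by unfold Spec_process_transcriptions; infer_instance

-- ===== CLAIM (what is proved, stated in full; the proofs are below) =====
def Claim_equal_process_transcriptions : Prop := ∀ (transcriptions : List String), Dom_process_transcriptions transcriptions → Spec_process_transcriptions transcriptions (process_transcriptions transcriptions)

-- ===== LEMMAS AND PROOFS =====

/-- the shared formatting step `" ".join(g).split("\n")` -/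
def pvEmit (g : List String) : List String := ((PySem.Str.split? (PySem.Str.join " " g) "\n").getD [])

/-- characterisation of A's loop (state = pending group `cur`, remaining input `l`) -/
def pvG (cur : List String) : List String → List (List String)
  | [] => if cur ≠ [] then [pvEmit cur] else []
  | x :: xs =>
      if x == "\n\n" then
        (if cur ≠ [] then pvEmit cur :: pvG [] xs else pvG [] xs)
      else pvG (cur ++ [x]) xs

theorem pvA_loop (l : List String) : ∀ (i : Int) (res : List (List String)) (cur : List String),
    (let st := (PySem.List.enumerate l i).foldl
      (fun (st : List (List String) × List String) (p : Int × String) =>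
        if p.2 == "\n\n" then
          (if st.2 ≠ [] then st.1 ++ [((PySem.Str.split? (PySem.Str.join " " st.2) "\n").getD [])] else st.1, [])
        else (st.1, st.2 ++ [p.2])) (res, cur)
     if st.2 ≠ [] then st.1 ++ [((PySem.Str.split? (PySem.Str.join " " st.2) "\n").getD [])] else st.1)
    = res ++ pvG cur l := by
  induction l with
  | nil => intro i res cur; simp [PySem.List.enumerate_nil, pvG, pvEmit]; split <;> simp
  | cons x xs ih =>
      intro i res cur
      simp only [PySem.List.enumerate_cons, List.foldl_cons, pvG]
      by_cases hx : x == "\n\n" <;> by_cases hc : cur = [] <;>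
        simp only [hx, hc, Bool.false_eq_true, if_true, if_false, ne_eq,
          not_true_eq_false, not_false_eq_true] <;>
        rw [ih] <;> simp [pvEmit]

/-- Nat-level positions of the markers in `ts` -/
def pvMN : List String → List Nat
  | [] => []
  | x :: xs => if x == "\n\n" then 0 :: (pvMN xs).map (· + 1) else (pvMN xs).map (· + 1)

/-- Nat-level core of B: the (start, end) pairs of the candidate segments -/
def pvPairs (a0 : Nat) (ms : List Nat) (n : Nat) : List (Nat × Nat) :=
  (a0 :: ms.map (· + 1)).zip (ms ++ [n])

def pvBC (ts : List String) : List (List String) :=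
  ((pvPairs 0 (pvMN ts) ts.length).filter (fun p => decide (p.1 < p.2))).map
    (fun p => pvEmit ((ts.drop p.1).take (p.2 - p.1)))

theorem pvMarks_shift (ts : List String) : ∀ (i : Int),
    ((PySem.List.enumerate ts i).filter (fun p => p.2 == "\n\n")).map (fun p => p.1)
      = (pvMN ts).map (fun (k : Nat) => i + (k : Int)) := by
  induction ts with
  | nil => intro i; simp [PySem.List.enumerate_nil, pvMN]
  | cons x xs ih =>
      intro i
      simp only [PySem.List.enumerate_cons, List.filter_cons]
      by_cases hx : x == "\n\n"
      · simp only [pvMN, hx, if_true, List.map_cons, ih (i + 1), List.map_map]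
        congr 1
        · simp
        · exact List.map_congr_left fun k _ => by simp only [Function.comp_apply]; push_cast; ring
      · simp only [pvMN, hx, Bool.false_eq_true, if_false, ih (i + 1), List.map_map]
        exact List.map_congr_left fun k _ => by simp only [Function.comp_apply]; push_cast; ring

/-- Port B computes the Nat-level core -/
theorem pvAlt_eq_bc (ts : List String) : process_transcriptions_alt ts = pvBC ts := by
  unfold process_transcriptions_alt pvBC
  dsimp only
  rw [pvMarks_shift ts 0]
  have h1 : ((0 : Int) :: ((pvMN ts).map (fun (k : Nat) => (0 : Int) + (k : Int))).map (fun a => a + 1))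
      = ((0 :: (pvMN ts).map (fun a => a + 1) : List Nat)).map (fun (k : Nat) => (k : Int)) := by
    simp [List.map_map]
  have h2 : (((pvMN ts).map (fun (k : Nat) => (0 : Int) + (k : Int))) ++ [(ts.length : Int)])
      = (((pvMN ts) ++ [ts.length] : List Nat)).map (fun (k : Nat) => (k : Int)) := by simp
  rw [h1, h2, List.zip_map, pvPairs, List.filter_map, List.map_map]
  have hf : List.filter ((fun p : Int × Int => decide (p.1 < p.2))
          ∘ Prod.map (fun (k : Nat) => (k : Int)) (fun (k : Nat) => (k : Int)))
        ((0 :: (pvMN ts).map (fun a => a + 1)).zip ((pvMN ts) ++ [ts.length]))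
      = List.filter (fun p : Nat × Nat => decide (p.1 < p.2))
        ((0 :: (pvMN ts).map (fun a => a + 1)).zip ((pvMN ts) ++ [ts.length])) :=
    List.filter_congr fun p _ => by simp [Prod.map]
  rw [hf]
  refine List.map_congr_left fun p _ => ?_
  simp only [Function.comp_apply, pvEmit, Prod.map_fst, Prod.map_snd]
  rw [PySem.List.slice_natCast]

theorem pvPairs_cons (a0 m n : Nat) (rest : List Nat) :
    pvPairs a0 (m :: rest) n = (a0, m) :: pvPairs (m + 1) rest n := rfl

theorem pvPairs_shift (ms : List Nat) : ∀ (a0 n c : Nat),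
    pvPairs (a0 + c) (ms.map (· + c)) (n + c) = (pvPairs a0 ms n).map (fun p => (p.1 + c, p.2 + c)) := by
  induction ms with
  | nil => intro a0 n c; simp [pvPairs]
  | cons m rest ih =>
      intro a0 n c
      rw [List.map_cons, pvPairs_cons, pvPairs_cons, List.map_cons,
        show m + c + 1 = (m + 1) + c by omega, ih (m + 1) n c]

/-- `pvMN` over a marker-free prefix -/
theorem pvMN_append (h : List String) (rest : List String) (hfree : ∀ s ∈ h, ¬ s == "\n\n") :
    pvMN (h ++ rest) = (pvMN rest).map (· + h.length) := by
  induction h with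
  | nil => simp
  | cons x xs ih =>
      have hx : (x == "\n\n") = false := by
        have := hfree x (by simp)
        simpa using this
      simp only [List.cons_append, pvMN, hx, Bool.false_eq_true, if_false]
      rw [ih (fun s hs => hfree s (by simp [hs])), List.map_map, List.length_cons]
      exact List.map_congr_left fun k _ => by simp only [Function.comp_apply]; omega

/-- B's core on a marker-free list -/
theorem pvBC_nomarker (h : List String) (hfree : ∀ s ∈ h, ¬ s == "\n\n") :
    pvBC h = if h ≠ [] then [pvEmit h] else [] := by
  have hm : pvMN h = [] := by
    have := pvMN_append h [] hfree
    simpa [pvMN] using this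
  unfold pvBC pvPairs
  rw [hm]
  by_cases hne : h = []
  · simp [hne]
  · have : 0 < h.length := List.length_pos_iff.mpr hne
    simp [List.filter, this, hne]

/-- B's core splits at the first marker -/
theorem pvBC_split (h t : List String) (hfree : ∀ s ∈ h, ¬ s == "\n\n") :
    pvBC (h ++ "\n\n" :: t) = (if h ≠ [] then [pvEmit h] else []) ++ pvBC t := by
  have hm : pvMN (h ++ "\n\n" :: t) = h.length :: (pvMN t).map (· + (h.length + 1)) := by
    rw [pvMN_append h _ hfree]
    simp only [pvMN, beq_self_eq_true, if_true, List.map_cons, List.map_map]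
    congr 1
    · omega
    · exact List.map_congr_left fun k _ => by simp only [Function.comp_apply]; omega
  set k := h.length with hk
  have hlen : (h ++ "\n\n" :: t).length = t.length + (k + 1) := by
    simp [hk]; omega
  have hshift := pvPairs_shift (pvMN t) 0 t.length (k + 1)
  rw [Nat.zero_add] at hshift
  unfold pvBC
  rw [hm, hlen, pvPairs_cons, hshift, List.filter_cons, List.filter_map]
  have hfc : (pvPairs 0 (pvMN t) t.length).filter
        ((fun p => decide (p.1 < p.2)) ∘ (fun p => (p.1 + (k + 1), p.2 + (k + 1))))
      = (pvPairs 0 (pvMN t) t.length).filter (fun p => decide (p.1 < p.2)) := by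
    refine List.filter_congr fun p _ => ?_
    simp only [Function.comp_apply]
    by_cases hp : p.1 < p.2 <;> simp [hp]
  rw [hfc]
  have hmap : ∀ p : Nat × Nat,
      ((fun p : Nat × Nat => pvEmit (((h ++ "\n\n" :: t).drop p.1).take (p.2 - p.1)))
        ∘ (fun p : Nat × Nat => (p.1 + (k + 1), p.2 + (k + 1)))) p
      = pvEmit ((t.drop p.1).take (p.2 - p.1)) := by
    intro p
    simp only [Function.comp_apply]
    have hd : (h ++ "\n\n" :: t).drop (p.1 + (k + 1)) = t.drop p.1 := by
      have he : h ++ "\n\n" :: t = (h ++ ["\n\n"]) ++ t := by simp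
      rw [he, show p.1 + (k + 1) = (h ++ ["\n\n"]).length + p.1 by simp [hk]; omega,
        List.drop_length_add_append]
    rw [hd, show p.2 + (k + 1) - (p.1 + (k + 1)) = p.2 - p.1 by omega]
  by_cases hne : h = []
  · have hk0 : k = 0 := by rw [hk, hne]; rfl
    rw [if_neg (by simp [hk0])]
    rw [List.map_map, List.map_congr_left fun p _ => hmap p]
    simp [hne]
  · have hk0 : 0 < k := by rw [hk]; exact List.length_pos_iff.mpr hne
    rw [if_pos (by simpa using hk0)]
    rw [List.map_cons, List.map_map, List.map_congr_left fun p _ => hmap p]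
    have htk : ((h ++ "\n\n" :: t).drop (0 : Nat)).take (k - 0) = h := by
      simp only [List.drop_zero, Nat.sub_zero, hk]
      exact List.take_left
    simp only [ne_eq, hne, not_false_eq_true, if_true, List.cons_append, List.nil_append]
    congr 1
    exact congrArg pvEmit htk

/-- A's loop equals B's core (generalised over the pending group) -/
theorem pvG_eq_bc (ts : List String) : ∀ (cur : List String), (∀ s ∈ cur, ¬ s == "\n\n") →
    pvG cur ts = pvBC (cur ++ ts) := by
  induction ts with
  | nil =>
      intro cur hfree
      simp only [List.append_nil, pvG]
      exact (pvBC_nomarker cur hfree).symm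
  | cons x xs ih =>
      intro cur hfree
      by_cases hx : x == "\n\n"
      · have hx' : x = "\n\n" := by simpa using hx
        subst hx'
        simp only [pvG, beq_self_eq_true, if_true]
        rw [pvBC_split cur xs hfree, ih [] (by simp)]
        simp only [List.nil_append]
        by_cases hc : cur = [] <;> simp [hc]
      · simp only [pvG, hx, Bool.false_eq_true, if_false]
        rw [ih (cur ++ [x]) (by intro s hs
                                rcases List.mem_append.mp hs with hmem | hmem
                                · exact hfree s hmem
                                · simp at hmem; subst hmem; simpa using hx)]
        simp

-- ===== VERDICT (by name: the statement is the Claim_ definition above) =====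
theorem process_transcriptions_spec : Claim_equal_process_transcriptions := by
  intro ts _
  unfold Spec_process_transcriptions process_transcriptions
  have hA := pvA_loop ts 0 [] []
  simp only [List.nil_append] at hA
  rw [hA, pvAlt_eq_bc]
  have := pvG_eq_bc ts [] (by simp)
  simpa using this
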